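-- pv_equiv track=rewrite | github.com/MrBrantCode/unitest_baseline | mut_generate/mist_train_cf/cf_89409/solution.py | traverse_matrix
-- ===== SOURCE A (Python) =====
-- def traverse_matrix(matrix):
--     rows = len(matrix)
--     if rows == 0:
--         return 0, 0
--     cols = len(matrix[0])
--
--     # Initialize variables
--     total_sum = 0
--     negative_count = 0
--
--     # Define boundaries
--     top = 0
--     bottom = rows - 1
--     left = 0
--     right = cols - 1
--
--     # Traverse matrix in a spiral form
--     while top <= bottom and left <= right:
--         # Traverse top row
--         for i in range(left, right + 1):
--             if matrix[top][i] > 0: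
--                 total_sum += matrix[top][i]
--             elif matrix[top][i] < 0:
--                 negative_count += 1
--         top += 1
--
--         # Traverse right column
--         for i in range(top, bottom + 1):
--             if matrix[i][right] > 0:
--                 total_sum += matrix[i][right]
--             elif matrix[i][right] < 0:
--                 negative_count += 1
--         right -= 1
--
--         # Traverse bottom row
--         if top <= bottom:
--             for i in range(right, left - 1, -1):
--                 if matrix[bottom][i] > 0:
--                     total_sum += matrix[bottom][i]
--                 elif matrix[bottom][i] < 0:
--                     negative_count += 1
--             bottom -= 1
--
--         # Traverse left column
--         if left <= right:
--             for i in range(bottom, top - 1, -1):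
--                 if matrix[i][left] > 0:
--                     total_sum += matrix[i][left]
--                 elif matrix[i][left] < 0:
--                     negative_count += 1
--             left += 1
--
--     return total_sum, negative_count
-- ===== SOURCE B (Python) =====
-- def traverse_matrix(matrix):
--     rows = len(matrix)
--     if rows == 0:
--         return 0, 0
--     cols = len(matrix[0])
--     total_sum = 0
--     negative_count = 0
--     for i in range(rows):
--         for j in range(cols):
--             v = matrix[i][j]
--             if v > 0:
--                 total_sum += v
--             elif v < 0:
--                 negative_count += 1
--     return total_sum, negative_count
-- ===== Notes on version B (the rewrite author's own statement) =====
-- stated objective: simpler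
-- what changed: Replaced the spiral traversal with four directional sub-loops and shrinking boundary variables by a plain row-major nested loop over the same rows x cols cells; same strict >0 / <0 tests, same (0,0) guard for an empty matrix.
import Mathlib
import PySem

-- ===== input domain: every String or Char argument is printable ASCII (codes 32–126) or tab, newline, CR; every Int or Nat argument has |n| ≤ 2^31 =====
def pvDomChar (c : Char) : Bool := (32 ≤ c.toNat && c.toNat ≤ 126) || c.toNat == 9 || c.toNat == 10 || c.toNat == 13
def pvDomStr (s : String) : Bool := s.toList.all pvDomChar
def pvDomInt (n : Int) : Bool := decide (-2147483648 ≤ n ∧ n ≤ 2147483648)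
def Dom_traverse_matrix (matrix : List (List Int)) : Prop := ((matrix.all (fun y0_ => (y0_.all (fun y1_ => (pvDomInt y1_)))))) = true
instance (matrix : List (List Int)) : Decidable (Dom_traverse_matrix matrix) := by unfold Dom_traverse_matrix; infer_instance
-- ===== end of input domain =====

-- B replaces A's spiral traversal (four directional sub-loops over shrinking boundaries)
-- by a plain row-major nested loop over the same rows×cols cells: simpler, same cost.

-- ===== PORT A =====
-- matrix[i][j] (indices always in range under Pre_)
def pvCell (m : List (List Int)) (i j : Int) : Int :=
  PySem.List.pyGetD (PySem.List.pyGetD m i []) j 0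

-- the shared loop body 'if v > 0: total_sum += v; elif v < 0: negative_count += 1'
-- (identical in A's four sub-loops and in B's inner loop)
def pvStep (acc : Int × Int) (v : Int) : Int × Int :=
  if v > 0 then (acc.1 + v, acc.2) else if v < 0 then (acc.1, acc.2 + 1) else acc

-- A's 'while top <= bottom and left <= right' loop; fuel only makes it total
-- (one extra row's worth of fuel is always enough: top strictly increases)
def spiralLoop (m : List (List Int)) : Nat → Int × Int → Int → Int → Int → Int → Int × Int
  | 0, s, _, _, _, _ => s
  | fuel+1, s, top, bottom, left, right =>
    if top ≤ bottom ∧ left ≤ right then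
      let s1 := (PySem.List.pyRange left (right+1) 1).foldl (fun acc i => pvStep acc (pvCell m top i)) s
      let top1 := top + 1
      let s2 := (PySem.List.pyRange top1 (bottom+1) 1).foldl (fun acc i => pvStep acc (pvCell m i right)) s1
      let right1 := right - 1
      if top1 ≤ bottom then
        let s3 := (PySem.List.pyRange right1 (left-1) (-1)).foldl (fun acc i => pvStep acc (pvCell m bottom i)) s2
        let bottom1 := bottom - 1
        if left ≤ right1 then
          let s4 := (PySem.List.pyRange bottom1 (top1-1) (-1)).foldl (fun acc i => pvStep acc (pvCell m i left)) s3
          spiralLoop m fuel s4 top1 bottom1 (left+1) right1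
        else spiralLoop m fuel s3 top1 bottom1 left right1
      else
        if left ≤ right1 then
          let s4 := (PySem.List.pyRange bottom (top1-1) (-1)).foldl (fun acc i => pvStep acc (pvCell m i left)) s2
          spiralLoop m fuel s4 top1 bottom (left+1) right1
        else spiralLoop m fuel s2 top1 bottom left right1
    else s

def traverse_matrix (matrix : List (List Int)) : Int × Int :=
  let rows : Int := matrix.length
  if rows = 0 then (0, 0)
  else
    let cols : Int := (PySem.List.pyGetD matrix 0 []).length
    spiralLoop matrix (matrix.length + 1) (0, 0) 0 (rows - 1) 0 (cols - 1)

-- ===== PORT B =====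
def traverse_matrix_alt (matrix : List (List Int)) : Int × Int :=
  let rows : Int := matrix.length
  if rows = 0 then (0, 0)
  else
    let cols : Int := (PySem.List.pyGetD matrix 0 []).length
    (PySem.List.pyRange 0 rows 1).foldl
      (fun acc i =>
        (PySem.List.pyRange 0 cols 1).foldl (fun acc j => pvStep acc (pvCell matrix i j)) acc)
      (0, 0)

-- ===== PRECONDITION & SPEC =====
-- Pre_ excludes exactly the jagged matrices on which the Python raises IndexError:
-- some row shorter than len(matrix[0]) (both A and B index every row up to cols-1).
def Pre_traverse_matrix (matrix : List (List Int)) : Prop :=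
  ∀ row ∈ matrix, (PySem.List.pyGetD matrix 0 []).length ≤ row.length
instance (matrix : List (List Int)) : Decidable (Pre_traverse_matrix matrix) := by
  unfold Pre_traverse_matrix; infer_instance

def pvWitness_traverse_matrix : List (List Int) := [[1, -2, 3], [4, 5, -6], [7, -8, 9]]

def Spec_traverse_matrix (matrix : List (List Int)) (out : Int × Int) : Prop := out = traverse_matrix_alt matrix
instance (matrix : List (List Int)) (out : Int × Int) : Decidable (Spec_traverse_matrix matrix out) := by unfold Spec_traverse_matrix; infer_instance

-- ===== CLAIM (what is proved, stated in full; the proofs are below) =====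
def Claim_equal_traverse_matrix : Prop := ∀ (matrix : List (List Int)), Dom_traverse_matrix matrix → Pre_traverse_matrix matrix → Spec_traverse_matrix matrix (traverse_matrix matrix)

-- ===== LEMMAS AND PROOFS =====

-- the contribution of one cell value to the (sum, count) pair
def pvG (v : Int) : Int × Int := ((if v > 0 then v else 0), (if v < 0 then 1 else 0))

theorem pvStep_eq (acc : Int × Int) (v : Int) : pvStep acc v = acc + pvG v := by
  unfold pvStep pvG
  split_ifs <;> first | omega | simp [Prod.ext_iff]

theorem pvFoldl_add {α : Type} (F : α → Int × Int) :
    ∀ (L : List α) (s : Int × Int), L.foldl (fun acc x => acc + F x) s = s + (L.map F).sum := by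
  intro L
  induction L with
  | nil => intro s; simp
  | cons x xs ih => intro s; simp [ih, add_assoc]

theorem pvLoop_sum {α : Type} (L : List α) (h : α → Int) (s : Int × Int) :
    L.foldl (fun acc x => pvStep acc (h x)) s = s + (L.map (fun x => pvG (h x))).sum := by
  simp only [pvStep_eq]
  exact pvFoldl_add _ L s

-- sum of one row segment / of a row-range of row sums
def pvR (m : List (List Int)) (i l r : Int) : Int × Int :=
  ((PySem.List.pyRange l (r+1) 1).map (fun j => pvG (pvCell m i j))).sum

def pvS (m : List (List Int)) (t b l r : Int) : Int × Int :=
  ((PySem.List.pyRange t (b+1) 1).map (fun i => pvR m i l r)).sum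

theorem pvRevSum (f : Int → Int × Int) (a b : Int) :
    ((PySem.List.pyRange a b (-1)).map f).sum = ((PySem.List.pyRange (b+1) (a+1) 1).map f).sum := by
  rw [PySem.List.pyRange_neg_one_eq_reverse]
  simp

theorem pvSumMapAdd {α : Type} (L : List α) (f h : α → Int × Int) :
    (L.map (fun x => f x + h x)).sum = (L.map f).sum + (L.map h).sum := by
  induction L with
  | nil => simp
  | cons x xs ih => simp [ih]; abel

-- the spiral loop accumulates exactly the rectangle sum pvS
theorem spiral_sum (m : List (List Int)) :
    ∀ (fuel : Nat) (t b l r : Int) (s : Int × Int), b + 1 - t ≤ (fuel : Int) →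
      spiralLoop m fuel s t b l r = s + pvS m t b l r := by
  intro fuel
  induction fuel with
  | zero =>
    intro t b l r s h
    have : PySem.List.pyRange t (b+1) 1 = [] := PySem.List.pyRange_one_eq_nil (by omega)
    simp [spiralLoop, pvS, this]
  | succ fuel ih =>
    intro t b l r s h
    by_cases hg : t ≤ b ∧ l ≤ r
    · obtain ⟨htb, hlr⟩ := hg
      by_cases h1 : t + 1 ≤ b
      · by_cases h2 : l ≤ r - 1
        · -- full case: t < b and l < r
          rw [show spiralLoop m (fuel+1) s t b l r =
              spiralLoop m fuel
                ((PySem.List.pyRange (b-1) ((t+1)-1) (-1)).foldl (fun acc i => pvStep acc (pvCell m i l))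
                  ((PySem.List.pyRange (r-1) (l-1) (-1)).foldl (fun acc i => pvStep acc (pvCell m b i))
                    ((PySem.List.pyRange (t+1) (b+1) 1).foldl (fun acc i => pvStep acc (pvCell m i r))
                      ((PySem.List.pyRange l (r+1) 1).foldl (fun acc i => pvStep acc (pvCell m t i)) s))))
                (t+1) (b-1) (l+1) (r-1) from by
            simp only [spiralLoop]
            rw [if_pos ⟨htb, hlr⟩, if_pos h1, if_pos h2]]
          rw [ih _ _ _ _ _ (by omega)]
          simp only [pvLoop_sum]
          -- now a pure sum identity
          have hA3 : ((PySem.List.pyRange (r-1) (l-1) (-1)).map (fun j => pvG (pvCell m b j))).sum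
              = ((PySem.List.pyRange l r 1).map (fun j => pvG (pvCell m b j))).sum := by
            rw [pvRevSum]; norm_num
          have hA4 : ((PySem.List.pyRange (b-1) ((t+1)-1) (-1)).map (fun i => pvG (pvCell m i l))).sum
              = ((PySem.List.pyRange (t+1) b 1).map (fun i => pvG (pvCell m i l))).sum := by
            rw [pvRevSum]; norm_num
          rw [hA3, hA4]
          -- expand pvS t b l r
          have houter : PySem.List.pyRange t (b+1) 1
              = t :: (PySem.List.pyRange (t+1) b 1 ++ [b]) := by
            rw [PySem.List.pyRange_one_cons (by omega), PySem.List.pyRange_one_succ_right (by omega)]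
          have hrowmid : ∀ i : Int, pvR m i l r
              = pvG (pvCell m i l) + (((PySem.List.pyRange (l+1) r 1).map (fun j => pvG (pvCell m i j))).sum + pvG (pvCell m i r)) := by
            intro i
            unfold pvR
            rw [PySem.List.pyRange_one_cons (by omega), PySem.List.pyRange_one_succ_right (by omega)]
            simp
          have hS : pvS m t b l r
              = pvR m t l r + ((((PySem.List.pyRange (t+1) b 1).map (fun i => pvR m i l r)).sum) + pvR m b l r) := by
            unfold pvS
            rw [houter]
            simp
          have hmid : ((PySem.List.pyRange (t+1) b 1).map (fun i => pvR m i l r)).sum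
              = ((PySem.List.pyRange (t+1) b 1).map (fun i => pvG (pvCell m i l))).sum
                + (((PySem.List.pyRange (t+1) b 1).map (fun i => ((PySem.List.pyRange (l+1) r 1).map (fun j => pvG (pvCell m i j))).sum)).sum
                  + ((PySem.List.pyRange (t+1) b 1).map (fun i => pvG (pvCell m i r))).sum) := by
            calc ((PySem.List.pyRange (t+1) b 1).map (fun i => pvR m i l r)).sum
                = ((PySem.List.pyRange (t+1) b 1).map (fun i =>
                    pvG (pvCell m i l) + (((PySem.List.pyRange (l+1) r 1).map (fun j => pvG (pvCell m i j))).sum + pvG (pvCell m i r)))).sum := by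
                  congr 1; exact List.map_congr_left (fun i _ => hrowmid i)
              _ = _ := by rw [pvSumMapAdd, pvSumMapAdd]
          have hrecS : pvS m (t+1) (b-1) (l+1) (r-1)
              = ((PySem.List.pyRange (t+1) b 1).map (fun i => ((PySem.List.pyRange (l+1) r 1).map (fun j => pvG (pvCell m i j))).sum)).sum := by
            unfold pvS pvR
            rw [show b - 1 + 1 = b from by omega, show r - 1 + 1 = r from by omega]
          have hrowt : pvR m t l r = ((PySem.List.pyRange l (r+1) 1).map (fun j => pvG (pvCell m t j))).sum := rfl
          have hrowb : pvR m b l r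
              = ((PySem.List.pyRange l r 1).map (fun j => pvG (pvCell m b j))).sum + pvG (pvCell m b r) := by
            unfold pvR
            rw [PySem.List.pyRange_one_succ_right (by omega)]
            simp
          have hcolr : ((PySem.List.pyRange (t+1) (b+1) 1).map (fun i => pvG (pvCell m i r))).sum
              = ((PySem.List.pyRange (t+1) b 1).map (fun i => pvG (pvCell m i r))).sum + pvG (pvCell m b r) := by
            rw [PySem.List.pyRange_one_succ_right (by omega)]
            simp
          rw [hrecS, hS, hmid, hrowt, hrowb, hcolr]
          abel
        · -- t < b, l = r
          have hl : l = r := by omega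
          subst hl
          rw [show spiralLoop m (fuel+1) s t b l l =
              spiralLoop m fuel
                ((PySem.List.pyRange (l-1) (l-1) (-1)).foldl (fun acc i => pvStep acc (pvCell m b i))
                  ((PySem.List.pyRange (t+1) (b+1) 1).foldl (fun acc i => pvStep acc (pvCell m i l))
                    ((PySem.List.pyRange l (l+1) 1).foldl (fun acc i => pvStep acc (pvCell m t i)) s)))
                (t+1) (b-1) l (l-1) from by
            simp only [spiralLoop]
            rw [if_pos ⟨htb, le_refl l⟩, if_pos h1, if_neg (by omega)]]
          rw [ih _ _ _ _ _ (by omega)]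
          simp only [pvLoop_sum]
          rw [PySem.List.pyRange_neg_one_eq_nil (le_refl _), PySem.List.pyRange_one_singleton]
          have hrec0 : pvS m (t+1) (b-1) l (l-1) = 0 := by
            unfold pvS pvR
            rw [show l - 1 + 1 = l from by omega, PySem.List.pyRange_one_eq_nil (le_refl l)]
            simp
          have hS : pvS m t b l l
              = pvG (pvCell m t l) + ((PySem.List.pyRange (t+1) (b+1) 1).map (fun i => pvG (pvCell m i l))).sum := by
            unfold pvS
            rw [PySem.List.pyRange_one_cons (by omega)]
            have : ∀ i : Int, pvR m i l l = pvG (pvCell m i l) := by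
              intro i; unfold pvR; rw [PySem.List.pyRange_one_singleton]; simp
            simp [this]
          rw [hrec0, hS]
          simp [add_assoc]
      · -- t = b
        have ht : t = b := by omega
        subst ht
        by_cases h2 : l ≤ r - 1
        · rw [show spiralLoop m (fuel+1) s t t l r =
              spiralLoop m fuel
                ((PySem.List.pyRange t ((t+1)-1) (-1)).foldl (fun acc i => pvStep acc (pvCell m i l))
                  ((PySem.List.pyRange (t+1) (t+1) 1).foldl (fun acc i => pvStep acc (pvCell m i r))
                    ((PySem.List.pyRange l (r+1) 1).foldl (fun acc i => pvStep acc (pvCell m t i)) s)))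
                (t+1) t (l+1) (r-1) from by
            simp only [spiralLoop]
            rw [if_pos ⟨le_refl t, hlr⟩, if_neg (by omega), if_pos h2]]
          rw [ih _ _ _ _ _ (by omega)]
          simp only [pvLoop_sum]
          rw [show t + 1 - 1 = t from by omega, PySem.List.pyRange_neg_one_eq_nil (le_refl _),
            PySem.List.pyRange_one_eq_nil (le_refl _)]
          have hrec0 : pvS m (t+1) t (l+1) (r-1) = 0 := by
            unfold pvS
            rw [PySem.List.pyRange_one_eq_nil (le_refl _)]
            simp
          have hS : pvS m t t l r = ((PySem.List.pyRange l (r+1) 1).map (fun j => pvG (pvCell m t j))).sum := by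
            unfold pvS
            rw [PySem.List.pyRange_one_singleton]
            simp [pvR]
          rw [hrec0, hS]
          simp
        · have hl : l = r := by omega
          subst hl
          rw [show spiralLoop m (fuel+1) s t t l l =
              spiralLoop m fuel
                ((PySem.List.pyRange (t+1) (t+1) 1).foldl (fun acc i => pvStep acc (pvCell m i l))
                  ((PySem.List.pyRange l (l+1) 1).foldl (fun acc i => pvStep acc (pvCell m t i)) s))
                (t+1) t l (l-1) from by
            simp only [spiralLoop]
            rw [if_pos ⟨le_refl t, le_refl l⟩, if_neg (by omega), if_neg (by omega)]]
          rw [ih _ _ _ _ _ (by omega)]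
          simp only [pvLoop_sum]
          rw [PySem.List.pyRange_one_eq_nil (le_refl _), PySem.List.pyRange_one_singleton]
          have hrec0 : pvS m (t+1) t l (l-1) = 0 := by
            unfold pvS
            rw [PySem.List.pyRange_one_eq_nil (le_refl _)]
            simp
          have hS : pvS m t t l l = pvG (pvCell m t l) := by
            unfold pvS pvR
            rw [PySem.List.pyRange_one_singleton, PySem.List.pyRange_one_singleton]
            simp
          rw [hrec0, hS]
          simp
    · -- guard false: loop exits, region sum is 0
      rw [show spiralLoop m (fuel+1) s t b l r = s from by
        simp only [spiralLoop]; rw [if_neg hg]]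
      have h0 : pvS m t b l r = 0 := by
        rcases not_and_or.mp hg with hb | hr
        · unfold pvS
          rw [PySem.List.pyRange_one_eq_nil (by omega)]
          simp
        · unfold pvS
          have : ∀ i : Int, pvR m i l r = 0 := by
            intro i; unfold pvR
            rw [PySem.List.pyRange_one_eq_nil (by omega)]
            simp
          simp [this]
      rw [h0, add_zero]

-- B's nested loop also computes the rectangle sum
theorem alt_sum (m : List (List Int)) (hm : m ≠ []) :
    traverse_matrix_alt m = pvS m 0 ((m.length : Int) - 1) 0 (((PySem.List.pyGetD m 0 []).length : Int) - 1) := by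
  unfold traverse_matrix_alt
  rw [if_neg (by simpa using hm)]
  have hinner : ∀ i : Int,
      (fun acc => (PySem.List.pyRange 0 ((PySem.List.pyGetD m 0 []).length : Int) 1).foldl
        (fun acc j => pvStep acc (pvCell m i j)) acc)
      = (fun acc => acc + pvR m i 0 (((PySem.List.pyGetD m 0 []).length : Int) - 1)) := by
    intro i
    funext acc
    rw [pvLoop_sum]
    unfold pvR
    rw [show ((PySem.List.pyGetD m 0 []).length : Int) - 1 + 1 = ((PySem.List.pyGetD m 0 []).length : Int) from by omega]
  calc (PySem.List.pyRange 0 (m.length : Int) 1).foldl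
        (fun acc i => (PySem.List.pyRange 0 ((PySem.List.pyGetD m 0 []).length : Int) 1).foldl
          (fun acc j => pvStep acc (pvCell m i j)) acc) (0, 0)
      = (PySem.List.pyRange 0 (m.length : Int) 1).foldl
          (fun acc i => acc + pvR m i 0 (((PySem.List.pyGetD m 0 []).length : Int) - 1)) (0, 0) := by
        exact PySem.List.foldl_congr_mem _ _ _ _ (fun acc a _ => congrFun (hinner a) acc)
    _ = _ := by
        rw [pvFoldl_add]
        unfold pvS
        rw [show (m.length : Int) - 1 + 1 = (m.length : Int) from by omega]
        simp

-- ===== VERDICT (by name: the statement is the Claim_ definition above) =====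
theorem traverse_matrix_spec : Claim_equal_traverse_matrix := by
  intro matrix _ _
  unfold Spec_traverse_matrix
  by_cases hm : matrix = []
  · subst hm; rfl
  · unfold traverse_matrix
    rw [if_neg (by simpa using hm)]
    rw [spiral_sum matrix (matrix.length + 1) 0 ((matrix.length : Int) - 1) 0
      (((PySem.List.pyGetD matrix 0 []).length : Int) - 1) (0, 0) (by push_cast; omega)]
    rw [alt_sum matrix hm]
    simp
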